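-- pv_equiv track=rewrite | github.com/ecrvmal/Yandex_test | test4.py | reversed_long_digit
-- ===== SOURCE A (Python) =====
-- def symbols(value):
--     num = 1
--     while True:
--         if value < 10:
--             return num
--         num += 1
--         value = value // 10
--
-- def reversed_long_digit(value, digits):
--     now_digits = symbols(value)
--     result = 0
--     while True:
--         if value < 10:
--             result = result * 10 + value
--             break
--         result_digit = value % 10
--         result = result *10 + result_digit
--         value = value // 10
--     extra_digits = digits - now_digits
--     result = 10 ** extra_digits * result
--     return result
-- ===== SOURCE B (Python) =====
-- def reversed_long_digit(value, digits):
--     if value < 10: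
--         return value * 10 ** (digits - 1)
--     rev = 0
--     p = 10 ** digits
--     v = value
--     while v:
--         p //= 10
--         rev += (v % 10) * p
--         v //= 10
--     return rev
-- ===== Notes on version B (the rewrite author's own statement) =====
-- stated objective: simpler
-- what changed: B replaces A's two arithmetic passes (a digit-counting loop plus a Horner reversal loop followed by a final power-of-ten scaling) with a single loop that places each digit directly at its final position using a descending power of ten; no digit count and no final multiplication are needed.
-- outside the precondition, e.g. on reversed_long_digit(123, 2): A returns 32.1, B returns 32; on reversed_long_digit(5, 0): A returns 0.5, B returns 0.5
import Mathlib
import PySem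

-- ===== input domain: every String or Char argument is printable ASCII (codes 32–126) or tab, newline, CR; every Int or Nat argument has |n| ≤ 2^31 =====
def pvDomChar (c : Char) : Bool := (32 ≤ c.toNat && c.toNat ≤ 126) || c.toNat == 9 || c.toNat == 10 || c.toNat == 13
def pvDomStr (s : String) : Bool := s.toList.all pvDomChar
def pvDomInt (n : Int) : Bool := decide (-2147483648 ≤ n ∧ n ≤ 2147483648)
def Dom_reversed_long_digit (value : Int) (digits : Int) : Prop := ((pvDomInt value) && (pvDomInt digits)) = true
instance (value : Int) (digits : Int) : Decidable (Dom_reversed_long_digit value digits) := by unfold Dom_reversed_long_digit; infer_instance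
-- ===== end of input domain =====

-- B replaces A's two digit loops plus final scaling by one loop that places each digit at its
-- final position via a descending power of ten (objective: simpler).

-- ===== PORT A =====
-- helper 'symbols': while True: if value < 10 return num; num += 1; value //= 10
def symbolsA (value : Int) (num : Int) : Int :=
  if value < 10 then num
  else symbolsA (PySem.Int.floordiv value 10) (num + 1)
termination_by value.toNat
decreasing_by
  rw [PySem.Int.floordiv_eq_ediv_of_pos (by norm_num : (0:Int) < 10)]
  omega

-- the reversal while-loop of A, accumulating 'result'
def revA (value : Int) (result : Int) : Int :=
  if value < 10 then result * 10 + value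
  else revA (PySem.Int.floordiv value 10) (result * 10 + PySem.Int.mod value 10)
termination_by value.toNat
decreasing_by
  rw [PySem.Int.floordiv_eq_ediv_of_pos (by norm_num : (0:Int) < 10)]
  omega

-- '10 ** extra_digits' is ported as 10 ^ extra_digits.toNat: exact whenever extra_digits ≥ 0,
-- i.e. on Pre_; for extra_digits < 0 Python produces a float, excluded by Pre_.
def reversed_long_digit (value : Int) (digits : Int) : Int :=
  let now_digits := symbolsA value 1
  let result := revA value 0
  let extra_digits := digits - now_digits
  10 ^ extra_digits.toNat * result

-- ===== PORT B =====
-- B's while-loop: while v: p //= 10; rev += (v % 10) * p; v //= 10.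
-- Fuel only makes the recursion total (value.toNat + 1 steps always suffice for v ≥ 0).
def goB (fuel : Nat) (v : Int) (rev : Int) (p : Int) : Int :=
  match fuel with
  | 0 => rev
  | fuel + 1 =>
    if v = 0 then rev
    else
      let p' := PySem.Int.floordiv p 10
      goB fuel (PySem.Int.floordiv v 10) (rev + PySem.Int.mod v 10 * p') p'

-- '10 ** digits' / '10 ** (digits - 1)' ported with .toNat: exact on Pre_ (digits ≥ 1, and
-- digits ≥ 2 whenever the second branch runs).
def reversed_long_digit_alt (value : Int) (digits : Int) : Int :=
  if value < 10 then value * 10 ^ (digits - 1).toNat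
  else goB (value.toNat + 1) value 0 (10 ^ digits.toNat)

-- ===== PRECONDITION & SPEC =====
-- Pre_ excludes exactly the inputs on which A's '10 ** extra_digits' has a negative exponent and
-- A therefore returns a float (not an int): digits must be ≥ the digit count of value.
def Pre_reversed_long_digit (value : Int) (digits : Int) : Prop :=
  1 ≤ digits ∧ (10 ≤ value → value < 10 ^ digits.toNat)
instance (value : Int) (digits : Int) : Decidable (Pre_reversed_long_digit value digits) := by
  unfold Pre_reversed_long_digit; infer_instance

def pvWitness_reversed_long_digit : Int × Int := (123, 5)

def Spec_reversed_long_digit (value : Int) (digits : Int) (out : Int) : Prop := out = reversed_long_digit_alt value digits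
instance (value : Int) (digits : Int) (out : Int) : Decidable (Spec_reversed_long_digit value digits out) := by unfold Spec_reversed_long_digit; infer_instance

-- ===== CLAIM (what is proved, stated in full; the proofs are below) =====
def Claim_equal_reversed_long_digit : Prop := ∀ (value : Int) (digits : Int), Dom_reversed_long_digit value digits → Pre_reversed_long_digit value digits → Spec_reversed_long_digit value digits (reversed_long_digit value digits)

-- ===== LEMMAS AND PROOFS =====

-- one-step unfolding helpers for the three loops (floordiv/mod turned into / and % for omega)
lemma symbolsA_lt (v num : Int) (h : v < 10) : symbolsA v num = num := by
  rw [symbolsA.eq_def, if_pos h]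

lemma symbolsA_ge (v num : Int) (h : ¬ v < 10) :
    symbolsA v num = symbolsA (v / 10) (num + 1) := by
  rw [symbolsA.eq_def, if_neg h,
    PySem.Int.floordiv_eq_ediv_of_pos (by norm_num : (0:Int) < 10)]

lemma revA_lt (v r : Int) (h : v < 10) : revA v r = r * 10 + v := by
  rw [revA.eq_def, if_pos h]

lemma revA_ge (v r : Int) (h : ¬ v < 10) :
    revA v r = revA (v / 10) (r * 10 + v % 10) := by
  rw [revA.eq_def, if_neg h,
    PySem.Int.floordiv_eq_ediv_of_pos (by norm_num : (0:Int) < 10),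
    PySem.Int.mod_eq_emod_of_pos (by norm_num : (0:Int) < 10)]

lemma goB_step (f : Nat) (v rev p : Int) (h : v ≠ 0) :
    goB (f + 1) v rev p = goB f (v / 10) (rev + v % 10 * (p / 10)) (p / 10) := by
  rw [goB, if_neg h]
  rw [PySem.Int.floordiv_eq_ediv_of_pos (by norm_num : (0:Int) < 10),
    PySem.Int.floordiv_eq_ediv_of_pos (by norm_num : (0:Int) < 10),
    PySem.Int.mod_eq_emod_of_pos (by norm_num : (0:Int) < 10)]

-- shifting the accumulator of symbolsA
lemma symbolsA_shift : ∀ (n : Nat) (v : Int), v.toNat ≤ n →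
    ∀ num : Int, symbolsA v num = num - 1 + symbolsA v 1 := by
  intro n
  induction n with
  | zero =>
    intro v hv num
    rw [symbolsA_lt v num (by omega), symbolsA_lt v 1 (by omega)]
    ring
  | succ n ih =>
    intro v hv num
    by_cases h : v < 10
    · rw [symbolsA_lt v num h, symbolsA_lt v 1 h]; ring
    · rw [symbolsA_ge v num h, symbolsA_ge v 1 h,
        ih (v / 10) (by omega) (num + 1), ih (v / 10) (by omega) (1 + 1)]
      ring

-- digit-count bounds: 1 ≤ S v and 10^(S v - 1) ≤ v < 10^(S v)  (for 1 ≤ v)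
lemma symbolsA_bounds : ∀ (n : Nat) (v : Int), v.toNat ≤ n → 1 ≤ v →
    1 ≤ symbolsA v 1 ∧ (10:Int) ^ ((symbolsA v 1).toNat - 1) ≤ v ∧ v < 10 ^ (symbolsA v 1).toNat := by
  intro n
  induction n with
  | zero => intro v hv h1; omega
  | succ n ih =>
    intro v hv h1
    by_cases h : v < 10
    · rw [symbolsA_lt v 1 h]
      norm_num; omega
    · rw [symbolsA_ge v 1 h, symbolsA_shift n (v / 10) (by omega) (1 + 1)]
      obtain ⟨hs1, hlo, hhi⟩ := ih (v / 10) (by omega) (by omega)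
      set S := symbolsA (v / 10) 1 with hS
      have hSt : (1 + 1 - 1 + S).toNat = S.toNat + 1 := by omega
      rw [hSt]
      refine ⟨by omega, ?_, ?_⟩
      · have e : (10:Int) ^ (S.toNat + 1 - 1) = 10 ^ (S.toNat - 1) * 10 := by
          rw [← pow_succ]; congr 1; omega
        rw [e]
        have hdm := Int.emod_add_mul_ediv v 10
        have hmod := Int.emod_nonneg v (by norm_num : (10:Int) ≠ 0)
        nlinarith
      · rw [pow_succ]
        have h2 : v < (v / 10 + 1) * 10 := by omega
        have h3 : v / 10 + 1 ≤ 10 ^ S.toNat := by omega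
        nlinarith [pow_pos (by norm_num : (0:Int) < 10) S.toNat]

-- shifting the accumulator of revA
lemma revA_shift : ∀ (n : Nat) (v : Int), v.toNat ≤ n → 0 ≤ v →
    ∀ r : Int, revA v r = r * 10 ^ (symbolsA v 1).toNat + revA v 0 := by
  intro n
  induction n with
  | zero =>
    intro v hv h0 r
    rw [revA_lt v r (by omega), revA_lt v 0 (by omega), symbolsA_lt v 1 (by omega)]
    norm_num
  | succ n ih =>
    intro v hv h0 r
    by_cases h : v < 10
    · rw [revA_lt v r h, revA_lt v 0 h, symbolsA_lt v 1 h]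
      norm_num
    · rw [revA_ge v r h, revA_ge v 0 h, symbolsA_ge v 1 h,
        symbolsA_shift n (v / 10) (by omega) (1 + 1)]
      have h0' : (0:Int) ≤ v / 10 := by omega
      have hn' : (v / 10).toNat ≤ n := by omega
      obtain ⟨hs1, _, _⟩ := symbolsA_bounds n (v / 10) hn' (by omega)
      set S := symbolsA (v / 10) 1 with hS
      rw [ih (v / 10) hn' h0' (r * 10 + v % 10), ih (v / 10) hn' h0' (0 * 10 + v % 10)]
      have hSt : (1 + 1 - 1 + S).toNat = S.toNat + 1 := by omega
      rw [hSt, pow_succ]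
      ring

-- the main loop correspondence: B's placement loop equals A's Horner value scaled by 10^(m - S v)
lemma goB_spec : ∀ (n : Nat) (v : Int), v.toNat ≤ n → 1 ≤ v →
    ∀ (m : Nat) (rev : Int) (f : Nat), v < 10 ^ m → v.toNat < f →
    goB f v rev (10 ^ m) = rev + 10 ^ (m - (symbolsA v 1).toNat) * revA v 0 := by
  intro n
  induction n with
  | zero => intro v hv h1; omega
  | succ n ih =>
    intro v hv h1 m rev f hm hf
    have hm1 : 1 ≤ m := by
      by_contra hc
      interval_cases m; omega
    obtain ⟨f', rfl⟩ : ∃ f', f = f' + 1 := ⟨f - 1, by omega⟩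
    rw [goB_step f' v rev _ (by omega)]
    have hp : (10:Int) ^ m / 10 = 10 ^ (m - 1) := by
      have e : (10:Int) ^ m = 10 ^ (m - 1) * 10 := by rw [← pow_succ]; congr 1; omega
      rw [e, Int.mul_ediv_cancel _ (by norm_num)]
    rw [hp]
    by_cases h : v < 10
    · -- last digit: v / 10 = 0 and the next call returns immediately
      have hv0 : v / 10 = 0 := by omega
      have hvm : v % 10 = v := by omega
      rw [hv0, hvm]
      obtain ⟨f'', rfl⟩ : ∃ f'', f' = f'' + 1 := ⟨f' - 1, by omega⟩
      rw [goB, if_pos rfl, symbolsA_lt v 1 h, revA_lt v 0 h]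
      norm_num; ring
    · have hdiv1 : 1 ≤ v / 10 := by omega
      have hdivm : v / 10 < 10 ^ (m - 1) := by
        have e : (10:Int) ^ m = 10 ^ (m - 1) * 10 := by rw [← pow_succ]; congr 1; omega
        omega
      have hdn : (v / 10).toNat ≤ n := by omega
      have hdf : (v / 10).toNat < f' := by omega
      rw [ih (v / 10) hdn hdiv1 (m - 1) _ f' hdivm hdf]
      rw [symbolsA_ge v 1 h, symbolsA_shift n (v / 10) hdn (1 + 1)]
      rw [revA_ge v 0 h, revA_shift n (v / 10) hdn (by omega) (0 * 10 + v % 10)]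
      obtain ⟨hs1, hlo, hhi⟩ := symbolsA_bounds n (v / 10) hdn (by omega)
      set S := symbolsA (v / 10) 1 with hS
      have hSt : (1 + 1 - 1 + S).toNat = S.toNat + 1 := by omega
      rw [hSt]
      -- S + 1 ≤ m, since 10^S ≤ 10·(v/10) ≤ v < 10^m
      have hSm : S.toNat + 1 ≤ m := by
        by_contra hc
        have hmS : m ≤ S.toNat := by omega
        have hle : (10:Int) ^ m ≤ 10 ^ S.toNat := pow_le_pow_right₀ (by norm_num) hmS
        have h10 : (10:Int) ^ S.toNat = 10 ^ (S.toNat - 1) * 10 := by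
          rw [← pow_succ]; congr 1; omega
        omega
      have e1 : (10:Int) ^ (m - (S.toNat + 1)) * 10 ^ S.toNat = 10 ^ (m - 1) := by
        rw [← pow_add]; congr 1; omega
      have e2 : m - 1 - S.toNat = m - (S.toNat + 1) := by omega
      rw [e2, ← e1]
      ring

-- unfolding A's body (the let-chain is definitionally transparent)
lemma reversed_long_digit_eq (value digits : Int) :
    reversed_long_digit value digits = 10 ^ (digits - symbolsA value 1).toNat * revA value 0 := rfl

-- ===== VERDICT (by name: the statement is the Claim_ definition above) =====
theorem reversed_long_digit_spec : Claim_equal_reversed_long_digit := by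
  intro value digits hdom hpre
  obtain ⟨hd1, hub⟩ := hpre
  unfold Spec_reversed_long_digit reversed_long_digit_alt
  rw [reversed_long_digit_eq]
  by_cases h : value < 10
  · rw [if_pos h, symbolsA_lt value 1 h, revA_lt value 0 h]
    norm_num [mul_comm]
  · rw [if_neg h]
    have h10 : (10:Int) ≤ value := by omega
    have hub' := hub h10
    rw [goB_spec value.toNat value le_rfl (by omega) digits.toNat 0 (value.toNat + 1) hub' (by omega)]
    obtain ⟨hs1, hlo, hhi⟩ := symbolsA_bounds value.toNat value le_rfl (by omega)
    set S := symbolsA value 1 with hS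
    have hSd : S.toNat ≤ digits.toNat := by
      by_contra hc
      have hle : (10:Int) ^ digits.toNat ≤ 10 ^ (S.toNat - 1) :=
        pow_le_pow_right₀ (by norm_num) (by omega)
      omega
    have e : (digits - S).toNat = digits.toNat - S.toNat := by omega
    rw [e]
    ring
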